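-- pv_equiv track=rewrite | github.com/amezousan/100-nlp-exercises | src/code/16.py | determine_split_filenames
-- ===== SOURCE A (Python) =====
-- def determine_split_filenames(split_count_of_file=1):
--     alphabets       = ['a', 'b', 'c', 'd', 'e', 'f', 'g', 'h', 'i', 'j', 'k', 'l', 'm', 'n', 'o', 'p', 'q', 'r', 's', 't', 'u', 'v', 'w', 'x', 'y', 'z']
--     filenames       = []
--     suffix_count    = 0
--
--     # split command splits a file into "xaa", "xab"..."xba"..."xxx" according to the lines of the file.
--     for i in range(split_count_of_file):
--         # There are 26 chars in alphabets and i counts up from 0. If i is a multiple of 26, this means a suffix (i.e "xa") is run out, so you need to start with the next suffix (i.e. "xb").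
--
--         alphabet_count = i % 26
--
--         if (i != 0) and (i % 26 == 0):
--             suffix_count += 1
--
--         # The suffix ends at "xzz".
--         if (suffix_count > 25):
--             return False
--
--         filenames.append("x" + alphabets[suffix_count] + alphabets[alphabet_count])
--
--     return filenames
-- ===== SOURCE B (Python) =====
-- LETTERS = "abcdefghijklmnopqrstuvwxyz"
-- # Precomputed once: all 676 split-style suffix names xaa..xzz, by index arithmetic.
-- _TABLE = ["x" + LETTERS[k // 26] + LETTERS[k % 26] for k in range(676)]
--
-- def determine_split_filenames(split_count_of_file=1):
--     if split_count_of_file > 676: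
--         return False
--     return _TABLE[:max(0, split_count_of_file)]
-- ===== Notes on version B (the rewrite author's own statement) =====
-- stated objective: simpler
-- what changed: B replaces A's per-iteration loop with a mutable suffix counter and early return by a once-precomputed 676-entry table built by index arithmetic (k//26, k%26), answering each call with a single slice after an explicit >676 guard.
-- outside the precondition, e.g. on determine_split_filenames(677): A returns False, B returns False
import Mathlib
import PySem

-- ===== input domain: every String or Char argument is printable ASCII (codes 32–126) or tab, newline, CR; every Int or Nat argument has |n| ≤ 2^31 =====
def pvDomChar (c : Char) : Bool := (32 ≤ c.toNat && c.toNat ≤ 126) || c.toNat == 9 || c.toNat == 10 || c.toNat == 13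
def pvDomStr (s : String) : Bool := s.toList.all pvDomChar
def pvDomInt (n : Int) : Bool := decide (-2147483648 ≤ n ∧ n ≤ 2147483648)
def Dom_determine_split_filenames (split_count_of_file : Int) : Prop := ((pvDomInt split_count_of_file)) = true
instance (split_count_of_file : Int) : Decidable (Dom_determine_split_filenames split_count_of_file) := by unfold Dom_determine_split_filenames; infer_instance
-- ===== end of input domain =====

-- B replaces A's per-iteration loop (mutable suffix counter, early return) by a precomputed
-- 676-entry table built by index arithmetic, consumed by a single slice (objective: simpler).

-- ===== PORT A =====
def pvAlphabets : List String := ["a","b","c","d","e","f","g","h","i","j","k","l","m","n","o","p","q","r","s","t","u","v","w","x","y","z"]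

def pvAGet (k : Int) : String := (PySem.List.pyGet? pvAlphabets k).getD ""

-- the for-loop of A; 'none' models the 'return False' early exit
def pvALoop : List Int → List String → Int → Option (List String × Int)
  | [], fns, sc => some (fns, sc)
  | i :: rest, fns, sc =>
      let ac := PySem.Int.mod i 26
      let sc' := if i ≠ 0 ∧ PySem.Int.mod i 26 = 0 then sc + 1 else sc
      if sc' > 25 then none
      else pvALoop rest (fns ++ ["x" ++ pvAGet sc' ++ pvAGet ac]) sc'

def determine_split_filenames (split_count_of_file : Int) : List String :=
  match pvALoop (PySem.List.pyRange 0 split_count_of_file 1) [] 0 with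
  | some (fns, _) => fns
  | none => []   -- here Python A returns False, not a list; excluded by Pre_

-- ===== PORT B =====
def pvLetters : String := "abcdefghijklmnopqrstuvwxyz"

def pvLGet (k : Int) : String := ((PySem.Str.pyGet? pvLetters k).map String.singleton).getD ""

def pvTable : List String :=
  (PySem.List.pyRange 0 676 1).map
    (fun k => "x" ++ pvLGet (PySem.Int.floordiv k 26) ++ pvLGet (PySem.Int.mod k 26))

def determine_split_filenames_alt (split_count_of_file : Int) : List String :=
  if split_count_of_file > 676 then []   -- Python B returns False here; excluded by Pre_
  else PySem.List.slice pvTable none (some (max 0 split_count_of_file))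

-- ===== PRECONDITION & SPEC =====
-- Pre_ excludes split_count_of_file > 676, where A (and B) return the bool False instead of a list of names.
def Pre_determine_split_filenames (split_count_of_file : Int) : Prop := split_count_of_file ≤ 676
instance (split_count_of_file : Int) : Decidable (Pre_determine_split_filenames split_count_of_file) := by unfold Pre_determine_split_filenames; infer_instance
def pvWitness_determine_split_filenames : Int := (30)

def Spec_determine_split_filenames (split_count_of_file : Int) (out : List String) : Prop := out = determine_split_filenames_alt split_count_of_file
instance (split_count_of_file : Int) (out : List String) : Decidable (Spec_determine_split_filenames split_count_of_file out) := by unfold Spec_determine_split_filenames; infer_instance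

-- ===== CLAIM (what is proved, stated in full; the proofs are below) =====
def Claim_equal_determine_split_filenames : Prop := ∀ (split_count_of_file : Int), Dom_determine_split_filenames split_count_of_file → Pre_determine_split_filenames split_count_of_file → Spec_determine_split_filenames split_count_of_file (determine_split_filenames split_count_of_file)

-- ===== LEMMAS AND PROOFS =====

-- A's and B's letter lookups agree on 0..25
theorem pvAGet_eq_pvLGet : ∀ j : Fin 26, pvAGet (j : Int) = pvLGet (j : Int) := by decide

theorem pvALoop_append (xs ys : List Int) (fns : List String) (sc : Int) :
    pvALoop (xs ++ ys) fns sc =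
      (pvALoop xs fns sc).bind (fun p => pvALoop ys p.1 p.2) := by
  induction xs generalizing fns sc with
  | nil => simp [pvALoop]
  | cons i rest ih =>
      simp only [List.cons_append, pvALoop]
      split_ifs <;> first | rfl | exact ih _ _

-- suffix counter after processing indices 0..m-1
def pvScOf (m : Nat) : Int := if m = 0 then 0 else (((m - 1) / 26 : Nat) : Int)

theorem pvTable_getElem (m : Nat) (hm : m < 676) :
    pvTable[m]'(by simpa [pvTable, PySem.List.length_pyRange_one] using hm) =
      "x" ++ pvLGet ((m / 26 : Nat) : Int) ++ pvLGet ((m % 26 : Nat) : Int) := by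
  simp [pvTable, PySem.List.getElem_pyRange_one]

theorem pvLoop_inv (m : Nat) (hm : m ≤ 676) :
    pvALoop (PySem.List.pyRange 0 (m : Int) 1) [] 0 = some (pvTable.take m, pvScOf m) := by
  induction m with
  | zero => simp [PySem.List.pyRange_one_eq_nil, pvALoop, pvScOf]
  | succ m ih =>
      have hm' : m ≤ 676 := by omega
      have hcast : ((m + 1 : Nat) : Int) = (m : Int) + 1 := by push_cast; ring
      rw [hcast, PySem.List.pyRange_one_succ_right (by positivity),
          pvALoop_append, ih hm']
      -- process the single element i = m
      simp only [Option.bind_some, pvALoop]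
      have hmod : PySem.Int.mod (m : Int) 26 = ((m % 26 : Nat) : Int) := by
        exact_mod_cast PySem.Int.mod_natCast m 26
      have hsc : (if (m : Int) ≠ 0 ∧ ((m % 26 : Nat) : Int) = 0
                    then pvScOf m + 1 else pvScOf m) = ((m / 26 : Nat) : Int) := by
        by_cases h0 : m = 0
        · subst h0; simp [pvScOf]
        · by_cases h26 : m % 26 = 0
          · have : (m : Int) ≠ 0 := by exact_mod_cast h0
            simp only [pvScOf, if_neg h0, h26, Nat.cast_zero, this, and_self, if_pos,
              ne_eq, not_false_eq_true]
            have : (m - 1) / 26 + 1 = m / 26 := by omega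
            exact_mod_cast this
          · have : ¬ (((m % 26 : Nat) : Int) = 0) := by exact_mod_cast h26
            simp only [pvScOf, if_neg h0, this, and_false, if_neg, not_false_eq_true]
            have : (m - 1) / 26 = m / 26 := by omega
            exact_mod_cast this
      rw [hmod, hsc]
      have hle : ¬ (((m / 26 : Nat) : Int) > 25) := by
        have : m / 26 ≤ 25 := by omega
        exact_mod_cast by omega
      rw [if_neg hle]
      have hdiv : m / 26 < 26 := by omega
      have hmod26 : m % 26 < 26 := by omega
      have e1 : pvAGet ((m / 26 : Nat) : Int) = pvLGet ((m / 26 : Nat) : Int) := by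
        simpa using pvAGet_eq_pvLGet ⟨m / 26, hdiv⟩
      have e2 : pvAGet ((m % 26 : Nat) : Int) = pvLGet ((m % 26 : Nat) : Int) := by
        simpa using pvAGet_eq_pvLGet ⟨m % 26, hmod26⟩
      have hmlt : m < 676 := by omega
      have htake : pvTable.take (m + 1) = pvTable.take m ++
          ["x" ++ pvLGet ((m / 26 : Nat) : Int) ++ pvLGet ((m % 26 : Nat) : Int)] := by
        have hlen : m < pvTable.length := by
          simpa [pvTable, PySem.List.length_pyRange_one] using hmlt
        rw [List.take_add_one, List.getElem?_eq_getElem hlen]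
        simp [pvTable_getElem m hmlt]
      rw [e1, e2, ← htake]
      simp [pvScOf]

-- ===== VERDICT (by name: the statement is the Claim_ definition above) =====
theorem determine_split_filenames_spec : Claim_equal_determine_split_filenames := by
  intro n _ hpre
  have h676 : n ≤ 676 := hpre
  unfold Spec_determine_split_filenames determine_split_filenames determine_split_filenames_alt
  rw [if_neg (by omega : ¬ n > 676)]
  by_cases hneg : n ≤ 0
  · rw [PySem.List.pyRange_one_eq_nil hneg]
    have hmax : max 0 n = ((0 : Nat) : Int) := by omega
    rw [hmax, PySem.List.slice_to_natCast]
    simp [pvALoop]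
  · obtain ⟨m, rfl⟩ : ∃ m : Nat, n = (m : Int) :=
      ⟨n.toNat, by omega⟩
    have hm : m ≤ 676 := by exact_mod_cast h676
    rw [pvLoop_inv m hm]
    have hmax : max 0 ((m : Nat) : Int) = ((m : Nat) : Int) := by omega
    rw [hmax, PySem.List.slice_to_natCast]
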